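-- pv_equiv track=rewrite | github.com/urimL/Algorithm | 프로그래머스/3/92343. 양과 늑대/양과 늑대.py | solution
-- ===== SOURCE A (Python) =====
-- def solution(info, edges):
--     answer = []
--     visited = [False] * len(info)
--
--     def dfs(sheep, wolf):
--         if sheep > wolf:
--             answer.append(sheep)
--         else:
--             return
--
--         for s,e in edges:
--             if visited[s] and not visited[e]:
--                 visited[e] = True
--
--                 if info[e] == 0:
--                     dfs(sheep+1, wolf)
--                 else:
--                     dfs(sheep, wolf+1)
--                 visited[e] = False
--
--     visited[0] = True
--     dfs(1,0)
--
--     return max(answer)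
-- ===== SOURCE B (Python) =====
-- def solution(info, edges):
--     # Frontier search: adjacency list built once; recursion carries the frontier
--     # of currently addable nodes and returns the running maximum directly.
--     n = len(info)
--     children = [[] for _ in range(n)]
--     for s, e in edges:
--         children[s].append(e)
--
--     def dfs(sheep, wolf, visited, frontier):
--         if sheep <= wolf:
--             return 0
--         best = sheep
--         for x in frontier:
--             nv = visited.copy()
--             nv[x] = True
--             nf = [y for y in frontier if y != x] + \
--                  [c for c in children[x] if not nv[c] and c not in frontier]
--             if info[x] == 0:
--                 r = dfs(sheep + 1, wolf, nv, nf)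
--             else:
--                 r = dfs(sheep, wolf + 1, nv, nf)
--             best = max(best, r)
--         return best
--
--     visited = [False] * n
--     visited[0] = True
--     return dfs(1, 0, visited, [c for c in children[0] if not visited[c]])
-- ===== Notes on version B (the rewrite author's own statement) =====
-- stated objective: alternative
-- what changed: B precomputes a children adjacency list once and recurses over an explicitly maintained frontier of currently addable nodes (pure state, returning the running maximum), instead of A's rescan of the whole edge list at every recursive call with a shared mutable visited array and a global answer list post-processed by max(); Pre_ restricts edges to nonnegative in-range node indices (the natural tree domain) since A's value on negative indices comes from Python's negative-index wraparound.
-- outside the precondition, e.g. on solution([0, 0], [[0, 1], [0, -1]]): A returns 2, B returns 3; on solution([0, 0], [[1, 5]]): A returns 1, B returns 1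
import Mathlib
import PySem

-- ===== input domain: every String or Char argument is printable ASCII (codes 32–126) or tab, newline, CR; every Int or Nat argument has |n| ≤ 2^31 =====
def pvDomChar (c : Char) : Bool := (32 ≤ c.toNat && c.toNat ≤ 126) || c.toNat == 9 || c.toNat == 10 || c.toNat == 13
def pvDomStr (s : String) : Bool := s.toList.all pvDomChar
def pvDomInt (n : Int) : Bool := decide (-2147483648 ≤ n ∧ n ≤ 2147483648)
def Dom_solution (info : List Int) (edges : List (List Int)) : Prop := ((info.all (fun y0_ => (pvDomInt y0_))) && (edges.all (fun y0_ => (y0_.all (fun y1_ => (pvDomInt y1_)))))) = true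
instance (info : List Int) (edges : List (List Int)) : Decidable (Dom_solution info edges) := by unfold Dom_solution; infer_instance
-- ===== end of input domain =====

-- B replaces A's per-call rescan of the whole edge list (with a shared mutable visited
-- array and a global answer list finished by max()) by a children adjacency list built
-- once and a recursion over an explicit frontier of currently addable nodes that
-- returns the running maximum directly.

-- ===== PORT A =====
-- The Python recursion marks visited[e], recurses, and unmarks it, so each call leaves
-- `visited` as it found it; the port passes `visited` functionally and returns the list
-- of values appended to `answer`, in append order.  `fuel` only bounds the recursion
-- depth (each level marks one further node of the n-element visited array, so a run
-- from the initial state never exhausts fuel = n).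
def dfsA (info : List Int) (edges : List (List Int)) : Nat → List Bool → Int → Int → List Int
  | 0, _, sheep, wolf => if sheep > wolf then [sheep] else []
  | fuel+1, visited, sheep, wolf =>
    if sheep > wolf then
      sheep :: edges.foldl (fun acc row =>
        match row with
        | [s, e] =>
          match PySem.List.pyGet? visited s, PySem.List.pyGet? visited e with
          | some true, some false =>
            -- visited[e] = True : Python's index normalization; exact because
            -- pyGet? visited e returned some, i.e. -len ≤ e < len
            match PySem.List.pyGet? info e with
            | some v =>
              acc ++ (if v = 0 then
                  dfsA info edges fuel (visited.set (PySem.Int.mod e (visited.length : Int)).toNat true) (sheep+1) wolf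
                else
                  dfsA info edges fuel (visited.set (PySem.Int.mod e (visited.length : Int)).toNat true) sheep (wolf+1))
            | none => acc      -- info[e] raises (unreachable: info and visited have the same length)
          | _, _ => acc
        | _ => acc) []         -- a row that is not a pair raises ValueError in Python (outside Pre_)
    else []

def solution (info : List Int) (edges : List (List Int)) : Int :=
  -- visited = [False]*len(info); visited[0] = True  (raises IndexError when info = [], outside Pre_)
  let visited := (List.replicate info.length false).set 0 true
  (PySem.List.max? (dfsA info edges info.length visited 1 0) (fun y => y)).getD 0

-- ===== PORT B =====
-- children[s].append(e); an out-of-range s raises in Python (outside Pre_), the port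
-- skips the row (List.set out of range is a no-op).
def buildChildren (n : Nat) (edges : List (List Int)) : List (List Int) :=
  edges.foldl (fun ch row =>
    match row with
    | [s, e] => ch.set s.toNat (ch.getD s.toNat [] ++ [e])
    | _ => ch) (List.replicate n [])

-- children[x] for 0 ≤ x < n (Python raises outside that range; unreachable under Pre_)
def childrenOf (children : List (List Int)) (x : Int) : List Int :=
  (PySem.List.pyGet? children x).getD []

-- `fuel` bounds the recursion depth exactly as in dfsA (one new marked node per level).
def dfsB (info : List Int) (children : List (List Int)) : Nat → Int → Int → List Bool → List Int → Int
  | 0, sheep, wolf, _, _ => if sheep ≤ wolf then 0 else sheep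
  | fuel+1, sheep, wolf, visited, frontier =>
    if sheep ≤ wolf then 0
    else
      frontier.foldl (fun best x =>
        let nv := visited.set x.toNat true    -- nv = visited.copy(); nv[x] = True (0 ≤ x < n)
        let nf := frontier.filter (fun y => !(y == x)) ++
          (childrenOf children x).filter (fun c =>
            (PySem.List.pyGet? nv c == some false) && !(frontier.contains c))
        let r := match PySem.List.pyGet? info x with
          | some v => if v = 0 then dfsB info children fuel (sheep+1) wolf nv nf
                      else dfsB info children fuel sheep (wolf+1) nv nf
          | none => 0     -- info[x] raises (unreachable: frontier elements lie in [0, n))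
        max best r) sheep

def solution_alt (info : List Int) (edges : List (List Int)) : Int :=
  let n := info.length
  let children := buildChildren n edges
  let visited := (List.replicate n false).set 0 true
  dfsB info children n 1 0 visited
    ((childrenOf children 0).filter (fun c => PySem.List.pyGet? visited c == some false))

-- ===== PRECONDITION & SPEC =====
def rowOk (n : Nat) (row : List Int) : Bool :=
  match row with
  | [s, e] => decide (0 ≤ s) && decide (s < (n : Int)) &&
              decide (0 ≤ e) && decide (e < (n : Int))
  | _ => false

-- Pre_ restricts the input to the natural tree domain: info nonempty (A raises
-- IndexError on visited[0] = True for info = []), every edge row a pair (otherwise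
-- A raises ValueError), and both endpoints nonnegative in-range node indices.
-- This excludes some inputs on which A still returns: negative endpoints (A's value
-- there comes from Python's negative-index wraparound, an artefact) and rows with an
-- out-of-range target whose source never becomes visited (A short-circuits on
-- visited[s] and ignores the row; B returns the same value there).
def Pre_solution (info : List Int) (edges : List (List Int)) : Prop :=
  info ≠ [] ∧ ∀ row ∈ edges, rowOk info.length row = true
instance (info : List Int) (edges : List (List Int)) : Decidable (Pre_solution info edges) := by
  unfold Pre_solution; infer_instance

def pvWitness_solution : List Int × List (List Int) := ([0, 0, 1], [[0, 1], [1, 2]])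

def Spec_solution (info : List Int) (edges : List (List Int)) (out : Int) : Prop := out = solution_alt info edges
instance (info : List Int) (edges : List (List Int)) (out : Int) : Decidable (Spec_solution info edges out) := by unfold Spec_solution; infer_instance

-- ===== CLAIM (what is proved, stated in full; the proofs are below) =====
def Claim_equal_solution : Prop := ∀ (info : List Int) (edges : List (List Int)), Dom_solution info edges → Pre_solution info edges → Spec_solution info edges (solution info edges)

-- ===== LEMMAS AND PROOFS =====

-- Python indexing xs[i] for -len ≤ i < len is lookup at the floor-mod-normalized index.
theorem pyGet?_mod {α : Type} (xs : List α) (i : Int)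
    (h1 : -(xs.length : Int) ≤ i) (h2 : i < (xs.length : Int)) :
    PySem.List.pyGet? xs i = xs[(PySem.Int.mod i (xs.length : Int)).toNat]? := by
  have hn : 0 < (xs.length : Int) := by omega
  have hm := PySem.Int.mod_eq_emod_of_pos (a := i) hn
  by_cases hi : 0 ≤ i
  · rw [PySem.List.pyGet?_of_nonneg xs hi]
    congr 2
    rw [hm, Int.emod_eq_of_lt hi h2]
  · replace hi : i < 0 := by omega
    have hk0 : 0 < (-i).toNat := by omega
    have hkl : (-i).toNat ≤ xs.length := by omega
    have hcast : -(((-i).toNat : Nat) : Int) = i := by omega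
    have hrw := PySem.List.pyGet?_neg_natCast xs (-i).toNat hk0 hkl
    rw [hcast] at hrw
    rw [hrw]
    congr 1
    have hiN : (i + (xs.length : Int)) % (xs.length : Int) = i % (xs.length : Int) := by
      have h9 := Int.add_mul_emod_self_left (a := i) (b := (xs.length : Int)) (c := 1)
      simp only [mul_one] at h9
      exact h9
    have hsmall : (i + (xs.length : Int)) % (xs.length : Int) = i + xs.length :=
      Int.emod_eq_of_lt (by omega) (by omega)
    have : PySem.Int.mod i (xs.length : Int) = i + xs.length := by omega
    omega

theorem mod_self_small {n : Nat} (x : Int) (h0 : 0 ≤ x) (h1 : x < (n : Int)) :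
    PySem.Int.mod x (n : Int) = x := by
  have hn : 0 < (n : Int) := by omega
  rw [PySem.Int.mod_eq_emod_of_pos hn, Int.emod_eq_of_lt h0 h1]

-- xs[i] for 0 ≤ i < len, as a plain getElem?
theorem pyGet?_small {α : Type} (xs : List α) (i : Int)
    (h0 : 0 ≤ i) (h1 : i < (xs.length : Int)) :
    PySem.List.pyGet? xs i = xs[i.toNat]? := by
  rw [pyGet?_mod xs i (by omega) h1, mod_self_small i h0 h1]

theorem rowOk_elim {n : Nat} {row : List Int} (h : rowOk n row = true) :
    ∃ s e : Int, row = [s, e] ∧ 0 ≤ s ∧ s < (n : Int) ∧ 0 ≤ e ∧ e < (n : Int) := by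
  match row with
  | [s, e] =>
    refine ⟨s, e, rfl, ?_, ?_, ?_, ?_⟩ <;> · simp [rowOk] at h; omega
  | [] => simp [rowOk] at h
  | [_] => simp [rowOk] at h
  | _ :: _ :: _ :: _ => simp [rowOk] at h

theorem dfsB_nonpos (info : List Int) (children : List (List Int)) (fuel : Nat)
    (sheep wolf : Int) (vl : List Bool) (F : List Int) (h : ¬ sheep > wolf) :
    dfsB info children fuel sheep wolf vl F = 0 := by
  cases fuel <;> simp [dfsB, show sheep ≤ wolf by omega]

-- proof-side name for buildChildren's fold step
def stepB (ch : List (List Int)) (row : List Int) : List (List Int) :=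
  match row with
  | [s, e] => ch.set s.toNat (ch.getD s.toNat [] ++ [e])
  | _ => ch

theorem buildChildren_eq (n : Nat) (edges : List (List Int)) :
    buildChildren n edges = edges.foldl stepB (List.replicate n []) := rfl

theorem stepB_length (ch : List (List Int)) (row : List Int) :
    (stepB ch row).length = ch.length := by
  match row with
  | [] => rfl
  | [_] => rfl
  | [_, _] => simp [stepB]
  | _ :: _ :: _ :: _ => rfl

theorem buildChildren_length (n : Nat) (edges : List (List Int)) :
    (buildChildren n edges).length = n := by
  rw [buildChildren_eq]
  suffices h : ∀ (l : List (List Int)) (acc : List (List Int)),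
      (l.foldl stepB acc).length = acc.length by
    rw [h]; simp
  intro l
  induction l with
  | nil => intro acc; rfl
  | cons r t ih => intro acc; rw [List.foldl_cons, ih, stepB_length]

theorem mem_buildChildren {n : Nat} (edges : List (List Int))
    (hrows : ∀ row ∈ edges, rowOk n row = true) (x : Nat) (z : Int) :
    z ∈ (buildChildren n edges).getD x [] ↔
      ∃ s e : Int, [s, e] ∈ edges ∧ s.toNat = x ∧ e = z := by
  rw [buildChildren_eq]
  suffices h : ∀ (l : List (List Int)) (acc : List (List Int)),
      (∀ row ∈ l, rowOk n row = true) → acc.length = n →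
      (z ∈ (l.foldl stepB acc).getD x [] ↔
        z ∈ acc.getD x [] ∨ ∃ s e : Int, [s, e] ∈ l ∧ s.toNat = x ∧ e = z) by
    rw [h edges (List.replicate n []) hrows (by simp)]
    have hrep : (List.replicate n ([] : List Int)).getD x [] = [] := by
      rw [List.getD_eq_getElem?_getD]
      rcases lt_or_ge x n with hlt | hge
      · simp [hlt]
      · rw [List.getElem?_eq_none (by simpa using hge)]; rfl
    rw [hrep]; simp
  intro l
  induction l with
  | nil => intro acc _ _; simp
  | cons r t ih =>
    intro acc hrows' hacc
    obtain ⟨s, e, rfl, hs1, hs2, he1, he2⟩ := rowOk_elim (hrows' r (List.mem_cons_self ..))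
    rw [List.foldl_cons]
    rw [ih _ (fun row hrow => hrows' row (List.mem_cons_of_mem _ hrow)) (by rw [stepB_length, hacc])]
    have hi : s.toNat < acc.length := by omega
    have hstep : stepB acc [s, e] = acc.set s.toNat (acc.getD s.toNat [] ++ [e]) := by
      simp [stepB]
    have hset : (acc.set s.toNat (acc.getD s.toNat [] ++ [e])).getD x [] =
        if s.toNat = x then acc.getD s.toNat [] ++ [e] else acc.getD x [] := by
      rw [List.getD_eq_getElem?_getD, List.getElem?_set]
      by_cases hix : s.toNat = x
      · simp [hix, hix ▸ hi]
      · simp [hix, ← List.getD_eq_getElem?_getD]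
    rw [hstep, hset]
    by_cases hix : s.toNat = x
    · simp only [if_pos hix, List.mem_append, List.mem_cons]
      constructor
      · rintro ((hz | hz | hz) | ⟨s', e', hm, hx', hz'⟩)
        · exact Or.inl (by rwa [hix] at hz)
        · exact Or.inr ⟨s, e, Or.inl rfl, hix, hz.symm⟩
        · exact absurd hz (List.not_mem_nil)
        · exact Or.inr ⟨s', e', Or.inr hm, hx', hz'⟩
      · rintro (hz | ⟨s', e', hm | hm, hx', hz'⟩)
        · exact Or.inl (Or.inl (by rwa [← hix] at hz))
        · obtain ⟨hs', he'⟩ : s' = s ∧ e' = e := by simpa using hm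
          exact Or.inl (Or.inr (Or.inl (by rw [← hz', he'])))
        · exact Or.inr ⟨s', e', hm, hx', hz'⟩
    · simp only [if_neg hix, List.mem_cons]
      constructor
      · rintro (hz | ⟨s', e', hm, hx', hz'⟩)
        · exact Or.inl hz
        · exact Or.inr ⟨s', e', Or.inr hm, hx', hz'⟩
      · rintro (hz | ⟨s', e', hm | hm, hx', hz'⟩)
        · exact Or.inl hz
        · exfalso
          obtain ⟨hs', he'⟩ : s' = s ∧ e' = e := by simpa using hm
          exact hix (by rw [← hs']; exact hx')
        · exact Or.inr ⟨s', e', hm, hx', hz'⟩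

-- children[x] for 0 ≤ x < n is exactly the list of targets of edges out of x
theorem mem_childrenOf {n : Nat} (edges : List (List Int))
    (hrows : ∀ row ∈ edges, rowOk n row = true) (x z : Int) (hx0 : 0 ≤ x) (hx1 : x < (n : Int)) :
    z ∈ childrenOf (buildChildren n edges) x ↔ [x, z] ∈ edges := by
  have hlen : (buildChildren n edges).length = n := buildChildren_length n edges
  have hxlt : x.toNat < (buildChildren n edges).length := by omega
  unfold childrenOf
  rw [PySem.List.pyGet?_of_nonneg _ hx0, List.getElem?_eq_getElem hxlt]
  have hgd : (buildChildren n edges)[x.toNat] = (buildChildren n edges).getD x.toNat [] := by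
    rw [List.getD_eq_getElem?_getD, List.getElem?_eq_getElem hxlt]; rfl
  rw [Option.getD_some, hgd, mem_buildChildren edges hrows x.toNat z]
  constructor
  · rintro ⟨s, e, hm, hs, rfl⟩
    obtain ⟨s', e', heq, hb1, _, _, _⟩ := rowOk_elim (hrows _ hm)
    obtain ⟨rfl, rfl⟩ : s = s' ∧ e = e' := by simpa using heq
    have : s = x := by omega
    rwa [← this]
  · intro hm
    exact ⟨x, z, hm, rfl, rfl⟩

-- lookup in `vl.set x.toNat true` in terms of lookup in vl, for in-range indices
theorem pyGet?_set_small (vl : List Bool) (x : Int) (hx0 : 0 ≤ x) (hx1 : x < (vl.length : Int))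
    (q : Int) (hq0 : 0 ≤ q) (hq1 : q < (vl.length : Int)) :
    PySem.List.pyGet? (vl.set x.toNat true) q =
      if q = x then some true else PySem.List.pyGet? vl q := by
  rw [pyGet?_small _ q hq0 (by simpa using hq1), pyGet?_small vl q hq0 hq1,
    List.getElem?_set]
  have hxl : x.toNat < vl.length := by omega
  by_cases h : q = x
  · have : x.toNat = q.toNat := by omega
    simp [h, this, show q.toNat < vl.length by omega]
  · have : ¬ x.toNat = q.toNat := by omega
    simp [this, h]

-- the set of nodes addable from `vl` according to A's edge scan
def Cand (edges : List (List Int)) (vl : List Bool) (z : Int) : Prop :=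
  ∃ s, [s, z] ∈ edges ∧ PySem.List.pyGet? vl s = some true ∧
    PySem.List.pyGet? vl z = some false

def FRel (edges : List (List Int)) (vl : List Bool) (F : List Int) : Prop :=
  ∀ z : Int, z ∈ F ↔ Cand edges vl z

-- the per-row contribution of A's edge scan, as a function (empty list = row skipped)
def gA (info : List Int) (edges : List (List Int)) (fuel : Nat) (vl : List Bool)
    (sheep wolf : Int) (row : List Int) : List Int :=
  match row with
  | [s, e] =>
    match PySem.List.pyGet? vl s, PySem.List.pyGet? vl e with
    | some true, some false =>
      match PySem.List.pyGet? info e with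
      | some v => if v = 0 then
            dfsA info edges fuel (vl.set (PySem.Int.mod e (vl.length : Int)).toNat true) (sheep+1) wolf
          else
            dfsA info edges fuel (vl.set (PySem.Int.mod e (vl.length : Int)).toNat true) sheep (wolf+1)
      | none => []
    | _, _ => []
  | _ => []

theorem dfsA_succ (info : List Int) (edges : List (List Int)) (fuel : Nat) (vl : List Bool)
    (sheep wolf : Int) :
    dfsA info edges (fuel+1) vl sheep wolf =
      if sheep > wolf then sheep :: edges.flatMap (gA info edges fuel vl sheep wolf) else [] := by
  by_cases h : sheep > wolf
  · simp only [dfsA, if_pos h]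
    congr 1
    refine Eq.trans (b := edges.foldl
        (fun acc row => acc ++ gA info edges fuel vl sheep wolf row) []) ?_
      (by rw [PySem.List.foldl_append_eq_flatMap]; simp)
    apply PySem.List.foldl_congr_mem
    intro acc row _
    match row with
      | [] => simp [gA]
      | [_] => simp [gA]
      | [s, e] =>
        rcases h1 : PySem.List.pyGet? vl s with _ | (_|_) <;>
          rcases h2 : PySem.List.pyGet? vl e with _ | (_|_) <;>
          rcases h3 : PySem.List.pyGet? info e with _ | v <;>
          simp [gA, h1, h2, h3]
      | _ :: _ :: _ :: _ => simp [gA]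
  · simp only [dfsA, if_neg h]

-- the frontier B passes to the recursive call for the chosen node x
def nfB (children : List (List Int)) (vl : List Bool) (F : List Int) (x : Int) : List Int :=
  F.filter (fun y => !(y == x)) ++
    (childrenOf children x).filter (fun c =>
      (PySem.List.pyGet? (vl.set x.toNat true) c == some false) && !(F.contains c))

-- the value B's loop folds in for the chosen node x
def gB (info : List Int) (children : List (List Int)) (fuel : Nat) (vl : List Bool)
    (F : List Int) (sheep wolf : Int) (x : Int) : Int :=
  match PySem.List.pyGet? info x with
  | some v => if v = 0 then
        dfsB info children fuel (sheep+1) wolf (vl.set x.toNat true) (nfB children vl F x)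
      else
        dfsB info children fuel sheep (wolf+1) (vl.set x.toNat true) (nfB children vl F x)
  | none => 0

theorem dfsB_succ (info : List Int) (children : List (List Int)) (fuel : Nat)
    (sheep wolf : Int) (vl : List Bool) (F : List Int) :
    dfsB info children (fuel+1) sheep wolf vl F =
      if sheep ≤ wolf then 0
      else F.foldl (fun best x => max best (gB info children fuel vl F sheep wolf x)) sheep := by
  by_cases h : sheep ≤ wolf
  · simp [dfsB, h]
  · simp only [dfsB, if_neg h]
    apply PySem.List.foldl_congr_mem
    intro acc x _
    rfl

theorem dfsA_nil (info : List Int) (edges : List (List Int)) (fuel : Nat) (vl : List Bool)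
    (sheep wolf : Int) (h : ¬ sheep > wolf) :
    dfsA info edges fuel vl sheep wolf = [] := by
  cases fuel <;> simp [dfsA, h]

-- membership in B's new frontier, for in-range x under Pre_'s row condition
theorem mem_nfB {n : Nat} (edges : List (List Int))
    (hrows : ∀ row ∈ edges, rowOk n row = true)
    (vl : List Bool) (hv : vl.length = n) (F : List Int) (x z : Int)
    (hx0 : 0 ≤ x) (hx1 : x < (n : Int)) :
    z ∈ nfB (buildChildren n edges) vl F x ↔
      (z ∈ F ∧ z ≠ x) ∨
      ([x, z] ∈ edges ∧ PySem.List.pyGet? vl z = some false ∧ z ≠ x ∧ z ∉ F) := by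
  unfold nfB
  simp only [List.mem_append, List.mem_filter, Bool.not_eq_eq_eq_not, Bool.not_true,
    beq_eq_false_iff_ne, ne_eq, Bool.and_eq_true, beq_iff_eq,
    List.contains_eq_mem, decide_eq_false_iff_not]
  rw [mem_childrenOf edges hrows x z hx0 hx1]
  constructor
  · rintro (⟨h1, h2⟩ | ⟨h1, h2, h3⟩)
    · exact Or.inl ⟨h1, h2⟩
    · obtain ⟨_, _, heq, _, _, hc0, hc1⟩ := rowOk_elim (hrows _ h1)
      obtain ⟨_, rfl⟩ : _ ∧ z = _ := by simpa using heq
      rw [pyGet?_set_small vl x hx0 (by omega) z hc0 (by omega)] at h2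
      by_cases hzx : z = x
      · rw [if_pos hzx] at h2; cases h2
      · rw [if_neg hzx] at h2
        exact Or.inr ⟨h1, h2, hzx, h3⟩
  · rintro (⟨h1, h2⟩ | ⟨h1, h2, h3, h4⟩)
    · exact Or.inl ⟨h1, h2⟩
    · obtain ⟨_, _, heq, _, _, hc0, hc1⟩ := rowOk_elim (hrows _ h1)
      obtain ⟨_, rfl⟩ : _ ∧ z = _ := by simpa using heq
      refine Or.inr ⟨h1, ?_, h4⟩
      rw [pyGet?_set_small vl x hx0 (by omega) z hc0 (by omega), if_neg h3]
      exact h2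

theorem pyGet?_init (n : Nat) (hn : 0 < n) (q : Int)
    (hq0 : 0 ≤ q) (hq1 : q < (n : Int)) :
    PySem.List.pyGet? ((List.replicate n false).set 0 true) q =
      if q = 0 then some true else some false := by
  have hlen : ((List.replicate n false).set 0 true).length = n := by simp
  rw [pyGet?_small _ q (by omega) (by rw [hlen]; exact hq1)]
  have hk : q.toNat < n := by omega
  rw [List.getElem?_set]
  by_cases h : q = 0
  · rw [if_pos (show (0 : Nat) = q.toNat by omega),
      if_pos (show 0 < (List.replicate n false).length by simpa using hn), if_pos h]
  · rw [if_neg (show ¬ (0 : Nat) = q.toNat by omega),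
      List.getElem?_replicate, if_pos hk, if_neg h]

theorem frel_init (info : List Int) (edges : List (List Int)) (hpre : Pre_solution info edges) :
    FRel edges ((List.replicate info.length false).set 0 true)
      ((childrenOf (buildChildren info.length edges) 0).filter
        (fun c => PySem.List.pyGet? ((List.replicate info.length false).set 0 true) c == some false)) := by
  obtain ⟨hne, hrows⟩ := hpre
  have hn : 0 < info.length := by
    cases info with
    | nil => exact absurd rfl hne
    | cons a t => simp
  intro z
  rw [List.mem_filter, mem_childrenOf edges hrows 0 z le_rfl (by exact_mod_cast hn)]
  constructor
  · rintro ⟨hrow, hzb⟩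
    have hz : PySem.List.pyGet? ((List.replicate info.length false).set 0 true) z = some false := by
      simpa using hzb
    refine ⟨0, hrow, ?_, hz⟩
    rw [pyGet?_init info.length hn 0 le_rfl (by exact_mod_cast hn), if_pos rfl]
  · rintro ⟨s, hrow, hs, hz⟩
    obtain ⟨s', e', heq, ha1, ha2, ha3, ha4⟩ := rowOk_elim (hrows _ hrow)
    obtain ⟨rfl, rfl⟩ : s = s' ∧ z = e' := by simpa using heq
    rw [pyGet?_init info.length hn s ha1 ha2] at hs
    have hs0 : s = 0 := by
      by_cases h : s = 0
      · exact h
      · rw [if_neg h] at hs; cases hs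
    rw [hs0] at hrow
    exact ⟨hrow, by simpa using hz⟩

theorem frel_step (info : List Int) (edges : List (List Int)) (hpre : Pre_solution info edges)
    (vl : List Bool) (F : List Int) (hv : vl.length = info.length)
    (hF : FRel edges vl F) (x : Int) (hxF : x ∈ F) :
    FRel edges (vl.set x.toNat true) (nfB (buildChildren info.length edges) vl F x) := by
  obtain ⟨hne, hrows⟩ := hpre
  have hn : 0 < info.length := by
    cases info with
    | nil => exact absurd rfl hne
    | cons a t => simp
  obtain ⟨s0, hr0, hs0, he0⟩ := (hF x).1 hxF
  obtain ⟨s0', e0', heq0, hb1, hb2, hb3, hb4⟩ := rowOk_elim (hrows _ hr0)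
  obtain ⟨rfl, rfl⟩ : s0 = s0' ∧ x = e0' := by simpa using heq0
  have hx_range : 0 ≤ x ∧ x < (info.length : Int) := ⟨hb3, hb4⟩
  intro z
  rw [mem_nfB edges hrows vl hv F x z hx_range.1 hx_range.2]
  have hset : ∀ q : Int, 0 ≤ q → q < (info.length : Int) →
      PySem.List.pyGet? (vl.set x.toNat true) q =
        if q = x then some true else PySem.List.pyGet? vl q := by
    intro q h1 h2
    exact pyGet?_set_small vl x hx_range.1 (by omega) q h1 (by omega)
  constructor
  · rintro (⟨hzF, hzx⟩ | ⟨hrow, hzb, hzx, hzF⟩)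
    · obtain ⟨s, hrow, hs, hz⟩ := (hF z).1 hzF
      obtain ⟨s', e', heq, ha1, ha2, ha3, ha4⟩ := rowOk_elim (hrows _ hrow)
      obtain ⟨rfl, rfl⟩ : s = s' ∧ z = e' := by simpa using heq
      refine ⟨s, hrow, ?_, ?_⟩
      · rw [hset s ha1 ha2]
        by_cases hc : s = x
        · rw [if_pos hc]
        · rw [if_neg hc]; exact hs
      · rw [hset z ha3 ha4, if_neg hzx]; exact hz
    · obtain ⟨s', e', heq, ha1, ha2, ha3, ha4⟩ := rowOk_elim (hrows _ hrow)
      obtain ⟨hxx, rfl⟩ : x = s' ∧ z = e' := by simpa using heq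
      refine ⟨x, hrow, ?_, ?_⟩
      · rw [hset x hx_range.1 hx_range.2, if_pos rfl]
      · rw [hset z ha3 ha4, if_neg hzx]; exact hzb
  · rintro ⟨s, hrow, hs, hz⟩
    obtain ⟨s', e', heq, ha1, ha2, ha3, ha4⟩ := rowOk_elim (hrows _ hrow)
    obtain ⟨rfl, rfl⟩ : s = s' ∧ z = e' := by simpa using heq
    rw [hset s ha1 ha2] at hs
    rw [hset z ha3 ha4] at hz
    have hzx : z ≠ x := by
      intro hc; rw [if_pos hc] at hz; cases hz
    rw [if_neg hzx] at hz
    by_cases hsx : s = x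
    · by_cases hzF : z ∈ F
      · exact Or.inl ⟨hzF, hzx⟩
      · rw [hsx] at hrow
        exact Or.inr ⟨hrow, hz, hzx, hzF⟩
    · rw [if_neg hsx] at hs
      exact Or.inl ⟨(hF z).2 ⟨s, hrow, hs, hz⟩, hzx⟩

theorem main_lemma (info : List Int) (edges : List (List Int)) (hpre : Pre_solution info edges) :
    ∀ (fuel : Nat) (vl : List Bool) (F : List Int) (sheep wolf : Int),
      vl.length = info.length → 1 ≤ sheep → 0 ≤ wolf →
      FRel edges vl F →
      PySem.List.max? (dfsA info edges fuel vl sheep wolf) (fun y => y)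
        = if sheep > wolf then
            some (dfsB info (buildChildren info.length edges) fuel sheep wolf vl F)
          else none := by
  obtain ⟨hne, hrows⟩ := hpre
  have hn : 0 < info.length := by
    cases info with
    | nil => exact absurd rfl hne
    | cons a t => simp
  intro fuel
  induction fuel with
  | zero =>
    intro vl F sheep wolf hv hs hw hF
    by_cases h : sheep > wolf
    · rw [show dfsA info edges 0 vl sheep wolf = [sheep] by simp [dfsA, h]]
      rw [PySem.List.max?_id_cons]
      simp [dfsB, h, show ¬ sheep ≤ wolf by omega]
    · rw [dfsA_nil info edges 0 vl sheep wolf h, if_neg h]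
      simp [PySem.List.max?_eq_none_iff]
  | succ fuel ih =>
    intro vl F sheep wolf hv hs hw hF
    by_cases h : sheep > wolf
    · rw [dfsA_succ, if_pos h, dfsB_succ, if_neg (by omega : ¬ sheep ≤ wolf), if_pos h,
        PySem.List.max?_id_cons]
      congr 1
      have hkey : ∀ s e : Int, [s, e] ∈ edges → PySem.List.pyGet? vl s = some true →
          PySem.List.pyGet? vl e = some false →
          e ∈ F ∧
          ((gA info edges fuel vl sheep wolf [s, e] = [] ∧
            gB info (buildChildren info.length edges) fuel vl F sheep wolf e = 0) ∨
           PySem.List.max? (gA info edges fuel vl sheep wolf [s, e]) (fun y => y) =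
             some (gB info (buildChildren info.length edges) fuel vl F sheep wolf e)) := by
        intro s e hrow hts hfe
        obtain ⟨s', e', heq, ha1, ha2, ha3, ha4⟩ := rowOk_elim (hrows _ hrow)
        obtain ⟨rfl, rfl⟩ : s = s' ∧ e = e' := by simpa using heq
        have hxF : e ∈ F := (hF _).2 ⟨s, hrow, hts, hfe⟩
        have hmodv : (PySem.Int.mod e (vl.length : Int)).toNat = e.toNat := by
          rw [hv, mod_self_small e ha3 ha4]
        have hfrel' := frel_step info edges ⟨hne, hrows⟩ vl F hv hF _ hxF
        have hvl' : (vl.set e.toNat true).length = info.length := by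
          rw [List.length_set, hv]
        refine ⟨hxF, ?_⟩
        rcases h3 : PySem.List.pyGet? info e with _ | v
        · exfalso
          rw [pyGet?_small info e ha3 ha4, List.getElem?_eq_getElem (by omega)] at h3
          cases h3
        · have hgA : gA info edges fuel vl sheep wolf [s, e] =
              (if v = 0 then
                dfsA info edges fuel (vl.set e.toNat true) (sheep+1) wolf
              else
                dfsA info edges fuel (vl.set e.toNat true) sheep (wolf+1)) := by
            simp [gA, hts, hfe, h3, hmodv]
          have hgB : gB info (buildChildren info.length edges) fuel vl F sheep wolf e =
              (if v = 0 then
                dfsB info (buildChildren info.length edges) fuel (sheep+1) wolf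
                  (vl.set e.toNat true) (nfB (buildChildren info.length edges) vl F e)
              else
                dfsB info (buildChildren info.length edges) fuel sheep (wolf+1)
                  (vl.set e.toNat true) (nfB (buildChildren info.length edges) vl F e)) := by
            simp [gB, h3]
          rw [hgA, hgB]
          by_cases hv0 : v = 0
          · rw [if_pos hv0, if_pos hv0]
            by_cases hsw : sheep + 1 > wolf
            · right
              rw [ih (vl.set e.toNat true)
                (nfB (buildChildren info.length edges) vl F e)
                (sheep+1) wolf hvl' (by omega) hw hfrel', if_pos hsw]
            · left
              exact ⟨dfsA_nil _ _ _ _ _ _ hsw, dfsB_nonpos _ _ _ _ _ _ _ hsw⟩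
          · rw [if_neg hv0, if_neg hv0]
            by_cases hsw : sheep > wolf + 1
            · right
              rw [ih (vl.set e.toNat true)
                (nfB (buildChildren info.length edges) vl F e)
                sheep (wolf+1) hvl' (by omega) (by omega) hfrel', if_pos hsw]
            · left
              exact ⟨dfsA_nil _ _ _ _ _ _ hsw, dfsB_nonpos _ _ _ _ _ _ _ hsw⟩
      apply le_antisymm
      · rcases PySem.List.foldl_max_mem
            (edges.flatMap (gA info edges fuel vl sheep wolf)) sheep with hA | hA
        · rw [hA]
          exact (PySem.List.le_foldl_max_int F
            (gB info (buildChildren info.length edges) fuel vl F sheep wolf) sheep).1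
        · obtain ⟨row, hrow, hmem⟩ := List.mem_flatMap.1 hA
          obtain ⟨s, e, rfl, _, _, _, _⟩ := rowOk_elim (hrows _ hrow)
          rcases h1 : PySem.List.pyGet? vl s with _ | (_ | _)
          · exact absurd hmem (by simp [gA, h1])
          · exact absurd hmem (by simp [gA, h1])
          · rcases h2 : PySem.List.pyGet? vl e with _ | (_ | _)
            · exact absurd hmem (by simp [gA, h1, h2])
            · obtain ⟨hxF, hcase⟩ := hkey s e hrow h1 h2
              rcases hcase with ⟨hnil, _⟩ | hmax
              · rw [hnil] at hmem; cases hmem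
              · have hle := PySem.List.max?_isMax hmax _ hmem
                exact le_trans hle ((PySem.List.le_foldl_max_int F
                  (gB info (buildChildren info.length edges) fuel vl F sheep wolf) sheep).2 _ hxF)
            · exact absurd hmem (by simp [gA, h1, h2])
      · rw [show F.foldl (fun best x => max best
            (gB info (buildChildren info.length edges) fuel vl F sheep wolf x)) sheep
            = (F.map (gB info (buildChildren info.length edges) fuel vl F sheep wolf)).foldl
                max sheep from List.foldl_map.symm]
        rcases PySem.List.foldl_max_mem
            (F.map (gB info (buildChildren info.length edges) fuel vl F sheep wolf)) sheep
          with hB | hB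
        · rw [hB]
          exact (PySem.List.le_foldl_max
            (edges.flatMap (gA info edges fuel vl sheep wolf)) sheep).1
        · obtain ⟨x, hxF, hgx⟩ := List.mem_map.1 hB
          obtain ⟨s, hrow, h1, h2⟩ := (hF x).1 hxF
          obtain ⟨hxF', hcase⟩ := hkey s x hrow h1 h2
          rcases hcase with ⟨hnil, hz⟩ | hmax
          · rw [← hgx, hz]
            have := (PySem.List.le_foldl_max
              (edges.flatMap (gA info edges fuel vl sheep wolf)) sheep).1
            omega
          · have hmem : gB info (buildChildren info.length edges) fuel vl F sheep wolf x ∈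
                gA info edges fuel vl sheep wolf [s, x] := PySem.List.max?_mem hmax
            have hin : gB info (buildChildren info.length edges) fuel vl F sheep wolf x ∈
                edges.flatMap (gA info edges fuel vl sheep wolf) :=
              List.mem_flatMap.2 ⟨[s, x], hrow, hmem⟩
            rw [← hgx]
            exact (PySem.List.le_foldl_max
              (edges.flatMap (gA info edges fuel vl sheep wolf)) sheep).2 _ hin
    · rw [dfsA_succ, if_neg h, if_neg h]
      simp [PySem.List.max?_eq_none_iff]

-- ===== VERDICT (by name: the statement is the Claim_ definition above) =====
theorem solution_spec : Claim_equal_solution := by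
  intro info edges _hdom hpre
  unfold Spec_solution
  show solution info edges = solution_alt info edges
  simp only [solution, solution_alt]
  rw [main_lemma info edges hpre info.length
    ((List.replicate info.length false).set 0 true)
    ((childrenOf (buildChildren info.length edges) 0).filter
      (fun c => PySem.List.pyGet? ((List.replicate info.length false).set 0 true) c == some false))
    1 0 (by simp) le_rfl le_rfl (frel_init info edges hpre)]
  norm_num
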